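-- pv_equiv track=rewrite | github.com/Ashishkumar448/GFG-Problem-of-the-day | 2024 -10-October-GFG-POTD/October-2-Rotate-And-Delete/Solution.py | rotateDelete
-- ===== SOURCE A (Python) =====
-- def rotateDelete(arr):
--     n = len(arr)
--     step = 1
--
--     while n > 1:
--         # Rotate: move the last element to the front
--         arr = [arr[-1]] + arr[:-1]
--
--         # Delete: delete the element at index (n - step)
--         remove_index = n - step
--         if remove_index < 0:
--             remove_index = 0  # If step exceeds the current size, remove the first element
--         arr.pop(remove_index)
--
--         # Reduce the size of the list after removal
--         n = len(arr)
--         step += 1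
--
--     # Return the last remaining element
--     return arr[0]
-- ===== SOURCE B (Python) =====
-- def rotateDelete(arr):
--     # Closed form: the surviving position depends only on len(arr).
--     n = len(arr)
--     if n == 1:
--         return arr[0]
--     return arr[n // 4 + (0, 1, 1, 2)[n % 4]]
-- ===== Notes on version B (the rewrite author's own statement) =====
-- stated objective: faster
-- what changed: Replaced the O(n^2) rotate-and-delete simulation by a proved O(1) closed form: the survivor is always the element at index n//4 + (0,1,1,2)[n%4] (index 0 for n=1).
import Mathlib
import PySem

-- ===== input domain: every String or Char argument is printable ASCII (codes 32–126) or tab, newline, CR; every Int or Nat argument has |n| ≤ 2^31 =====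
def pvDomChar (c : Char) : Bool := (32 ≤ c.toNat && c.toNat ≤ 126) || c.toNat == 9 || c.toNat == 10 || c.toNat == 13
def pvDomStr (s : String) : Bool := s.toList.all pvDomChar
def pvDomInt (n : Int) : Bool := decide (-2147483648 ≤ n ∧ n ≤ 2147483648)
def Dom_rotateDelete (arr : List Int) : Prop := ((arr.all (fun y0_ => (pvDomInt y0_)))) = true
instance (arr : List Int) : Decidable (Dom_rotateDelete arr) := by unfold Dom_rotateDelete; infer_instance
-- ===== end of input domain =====

-- B replaces A's rotate-and-delete simulation by a proved closed-form survivor index (faster).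

-- ===== PORT A =====
-- The while-loop is ported with fuel = len(arr): the loop runs exactly len(arr) - 1 times,
-- so the fuel is never exhausted (a totality device only, proved in rdLoop_eq below).
def rdLoop : Nat → List Int → Int → List Int
  | 0, arr, _ => arr
  | (fuel + 1), arr, step =>
    if 1 < arr.length then
      -- arr = [arr[-1]] + arr[:-1]
      let arr1 : List Int :=
        ((PySem.List.pyGet? arr (-1)).getD 0) :: PySem.List.slice arr none (some (-1))
      -- remove_index = n - step; if remove_index < 0: remove_index = 0
      let remove_index : Int := (arr.length : Int) - step
      let ri : Int := if remove_index < 0 then 0 else remove_index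
      match PySem.List.pop? arr1 ri with
      | some (_, rest) => rdLoop fuel rest (step + 1)
      | none => arr1  -- unreachable (Python IndexError)
    else arr

def rotateDelete (arr : List Int) : Int :=
  (PySem.List.pyGet? (rdLoop arr.length arr 1) 0).getD 0

-- ===== PORT B =====
def rotateDelete_alt (arr : List Int) : Int :=
  let n : Int := (arr.length : Int)
  if n == 1 then
    (PySem.List.pyGet? arr 0).getD 0
  else
    (PySem.List.pyGet? arr (PySem.Int.floordiv n 4 +
      (PySem.List.pyGet? ([0, 1, 1, 2] : List Int) (PySem.Int.mod n 4)).getD 0)).getD 0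

-- ===== PRECONDITION & SPEC =====
-- A (and B) raise IndexError on the empty list: excluded.
def Pre_rotateDelete (arr : List Int) : Prop := arr ≠ []
instance (arr : List Int) : Decidable (Pre_rotateDelete arr) := by unfold Pre_rotateDelete; infer_instance
def pvWitness_rotateDelete : List Int := [7, -3, 4, 4, 0]

def Spec_rotateDelete (arr : List Int) (out : Int) : Prop := out = rotateDelete_alt arr
instance (arr : List Int) (out : Int) : Decidable (Spec_rotateDelete arr out) := by unfold Spec_rotateDelete; infer_instance

-- ===== CLAIM (what is proved, stated in full; the proofs are below) =====
def Claim_equal_rotateDelete : Prop := ∀ (arr : List Int), Dom_rotateDelete arr → Pre_rotateDelete arr → Spec_rotateDelete arr (rotateDelete arr)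

-- ===== LEMMAS AND PROOFS =====

-- survIdx c m : the index, in the current list of length m (loop counter step = c - m),
-- of the element that finally survives A's loop.
def survIdx (c : Nat) : Nat → Nat
  | 0 => 0
  | 1 => 0
  | (m + 2) =>
      ((if survIdx c (m + 1) < 2 * (m + 2) - c then survIdx c (m + 1)
        else survIdx c (m + 1) + 1) + (m + 2) - 1) % (m + 2)

lemma survIdx_unfold (c k : Nat) :
    survIdx c (k + 2) =
      ((if survIdx c (k + 1) < 2 * (k + 2) - c then survIdx c (k + 1)
        else survIdx c (k + 1) + 1) + (k + 2) - 1) % (k + 2) := rfl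

lemma survIdx_lt (c : Nat) : ∀ m, 1 ≤ m → survIdx c m < m := by
  intro m h1
  match m, h1 with
  | 1, _ => simp [survIdx]
  | (m + 2), _ =>
      rw [survIdx_unfold]
      exact Nat.mod_lt _ (by omega)

lemma mod_helper (rot m' : Nat) (h0 : 0 < m') (h : rot ≤ m') :
    (rot + m' - 1) % m' = if rot = 0 then m' - 1 else rot - 1 := by
  rcases rot with _ | r
  · simp [Nat.mod_eq_of_lt (by omega : m' - 1 < m')]
  · have heq : r + 1 + m' - 1 = r + m' := by omega
    rw [heq, Nat.add_mod_right, Nat.mod_eq_of_lt (by omega)]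
    simp

lemma survIdx_closed (c : Nat) : ∀ m, 1 ≤ m → m < c →
    (2 * m ≤ c → survIdx c m = 0) ∧
    (c < 2 * m → survIdx c m = c / 2 - (m - (c + c / 2) / 2)) := by
  intro m
  induction m with
  | zero => omega
  | succ m ih =>
    intro _ hmc
    rcases Nat.eq_zero_or_pos m with hm0 | hm1
    · subst hm0
      exact ⟨fun _ => rfl, fun hc => by omega⟩
    · obtain ⟨k, rfl⟩ : ∃ k, m = k + 1 := ⟨m - 1, by omega⟩
      have ihk := ih (by omega) (by omega)
      have hlt := survIdx_lt c (k + 1) (by omega)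
      constructor
      · -- still in the first phase: the deleted rotated index is clamped to the front region
        intro hc
        have h0 : survIdx c (k + 1) = 0 := ihk.1 (by omega)
        have hj0 : 2 * (k + 2) - c = 0 := by omega
        rw [survIdx_unfold, h0, hj0]
        norm_num
      · intro hc
        rw [survIdx_unfold]
        by_cases hA : 2 * (k + 1) ≤ c
        · -- first step past the midpoint
          have h0 : survIdx c (k + 1) = 0 := ihk.1 hA
          rw [h0]
          have hjpos : 0 < 2 * (k + 2) - c := by omega
          rw [if_pos hjpos]
          rw [Nat.mod_eq_of_lt (show 0 + (k + 2) - 1 < k + 2 by omega)]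
          omega
        · have hB : survIdx c (k + 1) = c / 2 - (k + 1 - (c + c / 2) / 2) := ihk.2 (by omega)
          rw [hB] at hlt
          rw [hB]
          by_cases hA2 : c / 2 - (k + 1 - (c + c / 2) / 2) < 2 * (k + 2) - c
          · -- the deletion falls below the survivor: its index shifts down by one
            rw [if_pos hA2]
            have hne0 : c / 2 - (k + 1 - (c + c / 2) / 2) ≠ 0 := by omega
            rw [mod_helper (c / 2 - (k + 1 - (c + c / 2) / 2)) (k + 2) (by omega) (by omega)]
            rw [if_neg hne0]
            omega
          · -- the deletion falls at/above the survivor: its index is unchanged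
            rw [if_neg hA2]
            rw [mod_helper (c / 2 - (k + 1 - (c + c / 2) / 2) + 1) (k + 2) (by omega) (by omega)]
            rw [if_neg (by omega : ¬ c / 2 - (k + 1 - (c + c / 2) / 2) + 1 = 0)]
            omega

-- A's loop returns the singleton holding the element at index survIdx c m of its argument.
lemma rdLoop_eq (c : Nat) : ∀ (m fuel : Nat) (arr : List Int) (s : Int),
    arr.length = m → 1 ≤ m → m ≤ fuel + 1 → m < c → s = (c : Int) - m →
    rdLoop fuel arr s = [arr.getD (survIdx c m) 0] := by
  intro m
  induction m with
  | zero => intro fuel arr s _ h1; omega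
  | succ m ih =>
    intro fuel arr s hlen _ hfuel hmc hs
    have hne : arr ≠ [] := by intro h; subst h; simp at hlen
    rcases Nat.eq_zero_or_pos m with hm0 | hm1
    · -- length 1: the loop body is not entered
      subst hm0
      have harr : arr = [arr.getD (survIdx c 1) 0] := by
        rcases arr with _ | ⟨a, t⟩
        · simp at hlen
        · rcases t with _ | _
          · simp [survIdx]
          · simp at hlen
      rcases fuel with _ | g
      · exact harr
      · simp only [rdLoop]
        rw [if_neg (by omega)]
        exact harr
    · -- one iteration, then the induction hypothesis
      obtain ⟨k, rfl⟩ : ∃ k, m = k + 1 := ⟨m - 1, by omega⟩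
      obtain ⟨g, rfl⟩ : ∃ g, fuel = g + 1 := ⟨fuel - 1, by omega⟩
      have hgt : 1 < arr.length := by omega
      simp only [rdLoop]
      rw [if_pos hgt]
      simp only [PySem.List.pyGet?_neg_one, PySem.List.slice_to_neg_one,
        List.getLast?_eq_some_getLast hne, Option.getD_some]
      have hri : (if (arr.length : Int) - s < 0 then (0 : Int) else (arr.length : Int) - s)
          = ((2 * (k + 2) - c : Nat) : Int) := by
        rw [hlen, hs]; split_ifs <;> omega
      rw [hri]
      have hjlt : 2 * (k + 2) - c < (arr.getLast hne :: arr.dropLast).length := by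
        simp only [List.length_cons, List.length_dropLast, hlen]; omega
      have hpop := PySem.List.pop?_natCast (arr.getLast hne :: arr.dropLast)
        (2 * (k + 2) - c) hjlt
      have hrl : ((arr.getLast hne :: arr.dropLast).eraseIdx (2 * (k + 2) - c)).length
          = k + 1 := by
        rw [List.length_eraseIdx_of_lt hjlt]
        simp only [List.length_cons, List.length_dropLast, hlen]
        omega
      split
      case h_2 heq =>
        rw [hpop] at heq
        simp at heq
      case h_1 fst rest heq =>
      rw [hpop] at heq
      simp only [Option.some.injEq, Prod.mk.injEq] at heq
      obtain ⟨hfst, hrest⟩ := heq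
      subst hrest
      rw [ih g ((arr.getLast hne :: arr.dropLast).eraseIdx (2 * (k + 2) - c)) (s + 1)
        hrl (by omega) (by omega) (by omega) (by rw [hs]; push_cast; ring)]
      congr 1
      have hhlt : survIdx c (k + 1) < k + 1 := survIdx_lt c (k + 1) (by omega)
      rw [List.getD_eq_getElem _ _ (by rw [hrl]; omega)]
      rw [survIdx_unfold]
      rw [mod_helper (if survIdx c (k + 1) < 2 * (k + 2) - c then survIdx c (k + 1)
          else survIdx c (k + 1) + 1) (k + 2) (by omega)
          (by rcases Nat.lt_or_ge (survIdx c (k + 1)) (2 * (k + 2) - c) with h | h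
              · rw [if_pos h]; omega
              · rw [if_neg (Nat.not_lt.mpr h)]; omega)]
      rw [List.getElem_eraseIdx]
      rcases Nat.lt_or_ge (survIdx c (k + 1)) (2 * (k + 2) - c) with hcase | hcase
      · rw [dif_pos hcase, if_pos hcase]
        rcases Nat.eq_zero_or_pos (survIdx c (k + 1)) with h0 | hpos
        · -- rotated index 0: the head, i.e. the original last element
          simp only [h0, List.getElem_cons_zero]
          rw [if_pos trivial]
          rw [List.getD_eq_getElem _ _ (show k + 2 - 1 < arr.length by omega)]
          rw [List.getLast_eq_getElem]
          congr 1
          omega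
        · rw [if_neg (by omega : ¬ survIdx c (k + 1) = 0)]
          obtain ⟨r, hr⟩ : ∃ r, survIdx c (k + 1) = r + 1 :=
            ⟨survIdx c (k + 1) - 1, by omega⟩
          simp only [hr, List.getElem_cons_succ]
          rw [List.getD_eq_getElem _ _ (show r + 1 - 1 < arr.length by omega)]
          rw [List.getElem_dropLast]
          simp
      · rw [dif_neg (Nat.not_lt.mpr hcase), if_neg (Nat.not_lt.mpr hcase),
          if_neg (Nat.succ_ne_zero _)]
        rw [List.getD_eq_getElem _ _ (show survIdx c (k + 1) + 1 - 1 < arr.length by omega)]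
        simp only [List.getElem_cons_succ]
        rw [List.getElem_dropLast]
        simp

lemma survIdx_final (n : Nat) (h2 : 2 ≤ n) :
    survIdx (n + 1) n = n / 4 +
      (if n % 4 = 0 then 0 else if n % 4 = 3 then 2 else 1) := by
  rw [(survIdx_closed (n + 1) n (by omega) (by omega)).2 (by omega)]
  split_ifs <;> omega

-- ===== VERDICT (by name: the statement is the Claim_ definition above) =====
theorem rotateDelete_spec : Claim_equal_rotateDelete := by
  unfold Claim_equal_rotateDelete Spec_rotateDelete Pre_rotateDelete
  intro arr _ hne
  have hn1 : 1 ≤ arr.length := List.length_pos_of_ne_nil hne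
  have hloop := rdLoop_eq (arr.length + 1) arr.length arr.length arr 1 rfl hn1
    (by omega) (by omega) (by push_cast; ring)
  simp only [rotateDelete, rotateDelete_alt]
  rw [hloop]
  simp only [PySem.List.pyGet?_zero, List.getElem?_cons_zero, Option.getD_some]
  by_cases h1 : arr.length = 1
  · -- n = 1 : both sides read arr[0]
    have hc1 : ((arr.length : Int) == 1) = true := by simp [h1]
    rw [if_pos hc1, h1]
    simp [survIdx, List.getD]
  · have h2 : 2 ≤ arr.length := by omega
    have hc0 : ¬ (((arr.length : Int) == 1) = true) := by simp; omega
    rw [if_neg hc0]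
    rw [survIdx_final arr.length h2]
    have hfd : PySem.Int.floordiv ((arr.length : Int)) 4 = ((arr.length / 4 : Nat) : Int) := by
      exact_mod_cast PySem.Int.floordiv_natCast arr.length 4
    have hmod : PySem.Int.mod ((arr.length : Int)) 4 = ((arr.length % 4 : Nat) : Int) := by
      exact_mod_cast PySem.Int.mod_natCast arr.length 4
    rw [hfd, hmod, PySem.List.pyGet?_natCast]
    have hpat : (([0, 1, 1, 2] : List Int))[(arr.length % 4 : Nat)]? =
        some (((if arr.length % 4 = 0 then 0 else if arr.length % 4 = 3 then 2 else 1 : Nat)) : Int) := by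
      rcases (show arr.length % 4 = 0 ∨ arr.length % 4 = 1 ∨ arr.length % 4 = 2 ∨
          arr.length % 4 = 3 by omega) with h | h | h | h <;> simp [h]
    rw [hpat, Option.getD_some]
    have hidx : arr.length / 4 +
        (if arr.length % 4 = 0 then 0 else if arr.length % 4 = 3 then 2 else 1) < arr.length := by
      split_ifs <;> omega
    have hcast : ((arr.length / 4 : Nat) : Int) +
        (((if arr.length % 4 = 0 then 0 else if arr.length % 4 = 3 then 2 else 1 : Nat)) : Int) =
        ((arr.length / 4 +
          (if arr.length % 4 = 0 then 0 else if arr.length % 4 = 3 then 2 else 1) : Nat) : Int) := by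
      push_cast; ring
    rw [hcast, PySem.List.pyGet?_natCast, List.getElem?_eq_getElem hidx, Option.getD_some,
      List.getD_eq_getElem _ _ hidx]
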